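-- pv_equiv track=rewrite | github.com/UNR-RoboticsResearchLab/Tangrams | vidTest.py | getUpperLeft
-- ===== SOURCE A (Python) =====
-- def getUpperLeft(cont):
--     sums = []
--     for pt in cont:
--         sums.append(sum(pt[0]))
--     minVal = min(sums)
--     for pt in cont:
--         if sum(pt[0]) == minVal:
--             return pt[0]
--     return None
-- ===== SOURCE B (Python) =====
-- def getUpperLeft(cont):
--     best = None
--     best_sum = None
--     for pt in cont:
--         s = sum(pt[0])
--         if best_sum is None or s < best_sum:
--             best = pt[0]
--             best_sum = s
--     return best
-- ===== Notes on version B (the rewrite author's own statement) =====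
-- stated objective: alternative
-- what changed: Replaces A's staged structure (build a full list of coordinate sums, take its min, rescan the input for the first matching point) with a single pass that carries a running-best accumulator (best point and its sum) and never materialises the sums list or rescans.
import Mathlib
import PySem

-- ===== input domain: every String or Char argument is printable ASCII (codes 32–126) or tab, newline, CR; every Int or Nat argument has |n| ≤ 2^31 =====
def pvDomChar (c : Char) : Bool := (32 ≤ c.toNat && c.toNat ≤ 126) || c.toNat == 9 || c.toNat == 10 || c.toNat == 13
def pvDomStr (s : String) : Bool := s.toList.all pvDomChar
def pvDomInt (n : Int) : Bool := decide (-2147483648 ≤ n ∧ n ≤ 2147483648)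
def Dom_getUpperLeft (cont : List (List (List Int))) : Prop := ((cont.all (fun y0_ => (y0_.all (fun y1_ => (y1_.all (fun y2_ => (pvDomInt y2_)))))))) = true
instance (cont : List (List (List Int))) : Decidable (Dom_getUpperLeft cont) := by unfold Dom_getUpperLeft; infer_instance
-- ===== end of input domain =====

-- B replaces A's staged structure (build a sums list, take its min, rescan for the first match)
-- with a single pass carrying a running-best accumulator; return values proved equal on Pre_.

-- ===== PORT A =====
-- sum(pt[0]); inside Pre_ every pt is nonempty, so pyGet? never yields none (getD [] is never taken)
def pvKey (pt : List (List Int)) : Int := ((PySem.List.pyGet? pt 0).getD []).sum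

-- the second loop: return pt[0] for the first pt whose sum equals minVal, else fall through to return None
def pvFindFirst : List (List (List Int)) → Int → Option (List Int)
  | [], _ => none
  | pt :: rest, m => if pvKey pt = m then PySem.List.pyGet? pt 0 else pvFindFirst rest m

def getUpperLeft (cont : List (List (List Int))) : Option (List Int) :=
  let sums : List Int := cont.foldl (fun acc pt => acc ++ [pvKey pt]) []
  match PySem.List.min? sums (fun s => s) with
  | none => none                      -- min([]) raises ValueError: excluded by Pre_
  | some minVal => pvFindFirst cont minVal

-- ===== PORT B =====
-- one step of B's loop: state is (best, best_sum) bundled as Option (best_sum is None ↔ best is None)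
def pvBStep (acc : Option (List Int × Int)) (pt : List (List Int)) : Option (List Int × Int) :=
  let s := ((PySem.List.pyGet? pt 0).getD []).sum
  match acc with
  | none => some ((PySem.List.pyGet? pt 0).getD [], s)
  | some (b, bs) => if s < bs then some ((PySem.List.pyGet? pt 0).getD [], s) else some (b, bs)

def getUpperLeft_alt (cont : List (List (List Int))) : Option (List Int) :=
  (cont.foldl pvBStep none).map Prod.fst

-- ===== PRECONDITION & SPEC =====
-- Pre_ excludes exactly the inputs where Python A raises: empty cont (ValueError from min)
-- and any empty pt (IndexError from pt[0]).
def Pre_getUpperLeft (cont : List (List (List Int))) : Prop :=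
  cont ≠ [] ∧ ∀ pt ∈ cont, pt ≠ []
instance (cont : List (List (List Int))) : Decidable (Pre_getUpperLeft cont) := by
  unfold Pre_getUpperLeft; infer_instance

def pvWitness_getUpperLeft : List (List (List Int)) := [[[3, 4]], [[1, 2]]]

def Spec_getUpperLeft (cont : List (List (List Int))) (out : Option (List Int)) : Prop := out = getUpperLeft_alt cont
instance (cont : List (List (List Int))) (out : Option (List Int)) : Decidable (Spec_getUpperLeft cont out) := by unfold Spec_getUpperLeft; infer_instance

-- ===== CLAIM (what is proved, stated in full; the proofs are below) =====
def Claim_equal_getUpperLeft : Prop := ∀ (cont : List (List (List Int))), Dom_getUpperLeft cont → Pre_getUpperLeft cont → Spec_getUpperLeft cont (getUpperLeft cont)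

-- ===== LEMMAS AND PROOFS =====

-- one step of the min?-fold
def pvMStep {α : Type} (key : α → Int) (acc : Option α) (x : α) : Option α :=
  match acc with
  | none => some x
  | some m => if key x < key m then some x else some m

theorem pvMin?_eq_foldl {α : Type} (key : α → Int) (xs : List α) :
    PySem.List.min? xs key = xs.foldl (pvMStep key) none := rfl

theorem pvFoldl_some {α : Type} (key : α → Int) (l : List α) (a : α) :
    l.foldl (pvMStep key) (some a) =
      match l.foldl (pvMStep key) none with
      | none => some a
      | some m => if key m < key a then some m else some a := by
  induction l generalizing a with
  | nil => simp
  | cons x l ih =>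
    simp only [List.foldl_cons, pvMStep]
    rw [ih x]
    by_cases hxa : key x < key a
    · simp only [if_pos hxa]
      rw [ih x]
      rcases h : l.foldl (pvMStep key) none with _ | m
      · simp [if_pos hxa]
      · by_cases hmx : key m < key x
        · have : key m < key a := lt_trans hmx hxa
          simp [if_pos hmx, if_pos this]
        · have : ¬ key x < key x := lt_irrefl _
          simp [if_neg hmx, if_pos hxa]
    · simp only [if_neg hxa]
      rw [ih a]
      rcases h : l.foldl (pvMStep key) none with _ | m
      · simp [if_neg hxa]
      · by_cases hmx : key m < key x
        · by_cases hma : key m < key a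
          · simp [if_pos hmx, if_pos hma]
          · simp [if_pos hmx, if_neg hma]
        · by_cases hma : key m < key a
          · omega
          · simp [if_neg hmx, if_neg hma, if_neg hxa]

theorem pvMin?_cons {α : Type} (key : α → Int) (x : α) (l : List α) :
    PySem.List.min? (x :: l) key =
      match PySem.List.min? l key with
      | none => some x
      | some m => if key m < key x then some m else some x := by
  rw [pvMin?_eq_foldl, pvMin?_eq_foldl, List.foldl_cons]
  show l.foldl (pvMStep key) (some x) = _
  exact pvFoldl_some key l x

-- min? returns the FIRST element achieving the minimal key
theorem pvFind_min {α : Type} (key : α → Int) (cont : List α) (m : α)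
    (h : PySem.List.min? cont key = some m) :
    cont.find? (fun pt => decide (key pt = key m)) = some m := by
  induction cont with
  | nil => simp [PySem.List.min?] at h
  | cons x l ih =>
    rw [pvMin?_cons] at h
    rcases hl : PySem.List.min? l key with _ | n
    · rw [hl] at h
      change some x = some m at h
      injection h with h
      subst h
      simp
    · rw [hl] at h
      change (if key n < key x then some n else some x) = some m at h
      by_cases hc : key n < key x
      · rw [if_pos hc] at h
        injection h with h
        subst h
        rw [List.find?]
        have hne : ¬ key x = key n := by omega
        simp only [hne, decide_false]
        exact ih hl
      · rw [if_neg hc] at h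
        injection h with h
        subst h
        simp [List.find?]

-- mapping the key commutes with the min?-fold
theorem pvFoldl_map {α : Type} (key : α → Int) (l : List α) (acc : Option α) :
    (l.map key).foldl (pvMStep (fun s => s)) (acc.map key) =
      (l.foldl (pvMStep key) acc).map key := by
  induction l generalizing acc with
  | nil => rfl
  | cons x l ih =>
    simp only [List.map_cons, List.foldl_cons]
    rw [← ih]
    congr 1
    rcases acc with _ | a
    · simp [pvMStep]
    · simp only [pvMStep]; split_ifs <;> simp <;> omega

theorem pvMin?_map (key : List (List Int) → Int) (cont : List (List (List Int))) :
    PySem.List.min? (cont.map key) (fun s => s) = (PySem.List.min? cont key).map key := by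
  rw [pvMin?_eq_foldl, pvMin?_eq_foldl]
  simpa using pvFoldl_map key cont none

-- A's first loop builds exactly the mapped list
theorem pvSums_eq (cont : List (List (List Int))) (acc : List Int) :
    cont.foldl (fun acc pt => acc ++ [pvKey pt]) acc = acc ++ cont.map pvKey := by
  induction cont generalizing acc with
  | nil => simp
  | cons x l ih => simp [ih]

-- A's second loop is find?-then-pt[0]
theorem pvFindFirst_eq_find? (cont : List (List (List Int))) (v : Int) :
    pvFindFirst cont v =
      match cont.find? (fun pt => decide (pvKey pt = v)) with
      | some pt => PySem.List.pyGet? pt 0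
      | none => none := by
  induction cont with
  | nil => rfl
  | cons x l ih =>
    by_cases h : pvKey x = v <;> simp [pvFindFirst, List.find?, h, ih]

-- B's fold carries exactly the image of the min?-fold state under pt ↦ (pt[0], key pt)
def pvG (pt : List (List Int)) : List Int × Int := ((PySem.List.pyGet? pt 0).getD [], pvKey pt)

theorem pvBStep_eq (acc : Option (List (List Int))) (x : List (List Int)) :
    pvBStep (acc.map pvG) x = (pvMStep pvKey acc x).map pvG := by
  rcases acc with _ | a
  · rfl
  · simp only [Option.map_some, pvBStep, pvMStep, pvG, pvKey]
    split_ifs <;> simp [pvG, pvKey]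

theorem pvBFold_eq (cont : List (List (List Int))) (acc : Option (List (List Int))) :
    cont.foldl pvBStep (acc.map pvG) = (cont.foldl (pvMStep pvKey) acc).map pvG := by
  induction cont generalizing acc with
  | nil => rfl
  | cons x l ih => simp only [List.foldl_cons, pvBStep_eq, ih]

theorem pvAlt_eq_min? (cont : List (List (List Int))) :
    getUpperLeft_alt cont =
      (PySem.List.min? cont pvKey).map (fun pt => (PySem.List.pyGet? pt 0).getD []) := by
  unfold getUpperLeft_alt
  have h := pvBFold_eq cont none
  simp only [Option.map_none] at h
  rw [h, pvMin?_eq_foldl]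
  rcases cont.foldl (pvMStep pvKey) none with _ | m <;> simp [pvG]

-- for nonempty pt, pt[0] is a value, so pyGet? equals getD-wrapped-some
theorem pvGet0_nonempty (pt : List (List Int)) (h : pt ≠ []) :
    PySem.List.pyGet? pt 0 = some ((PySem.List.pyGet? pt 0).getD []) := by
  rcases pt with _ | ⟨x, l⟩
  · exact absurd rfl h
  · simp [PySem.List.pyGet?, PySem.List.pyIdx?]

-- ===== VERDICT (by name: the statement is the Claim_ definition above) =====
theorem getUpperLeft_spec : Claim_equal_getUpperLeft := by
  intro cont _ hpre
  unfold Spec_getUpperLeft getUpperLeft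
  rcases hpre with ⟨hne, hpts⟩
  rcases hmin : PySem.List.min? cont pvKey with _ | m
  · exact absurd (PySem.List.min?_eq_none_iff cont pvKey |>.mp hmin) hne
  · simp only [pvSums_eq cont [], List.nil_append, pvMin?_map pvKey cont, hmin,
      Option.map_some]
    rw [pvFindFirst_eq_find?, pvFind_min pvKey cont m hmin, pvAlt_eq_min?, hmin,
      Option.map_some]
    exact pvGet0_nonempty m (hpts m (PySem.List.min?_mem hmin))
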